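-- pv_equiv track=rewrite | github.com/MrBrantCode/unitest_baseline | mut_generate/mist_train_cf/cf_86817/solution.py | generate_fibonacci_series
-- ===== SOURCE A (Python) =====
-- def generate_fibonacci_series(num):
--     a, b = 0, 1
--     fib_series = []
--
--     if num <= 0:
--         return fib_series
--
--     if num == 1:
--         fib_series.append(0)
--         return fib_series
--
--     if num == 2:
--         fib_series.extend([0, 1])
--         return fib_series
--
--     fib_series.extend([0, 1])
--
--     for i in range(2, num):
--         next_num = a + b
--         a, b = b, next_num
--
--         fib_series.append(next_num)
--
--         if next_num % 2 == 0:
--             fib_series.append(next_num * 2)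
--
--         if next_num % 3 == 0:
--             fib_series.append(next_num // 3)
--
--         if next_num % 5 == 0:
--             fib_series.append(next_num - 5)
--
--     return fib_series
-- ===== SOURCE B (Python) =====
-- def generate_fibonacci_series(num):
--     # Pass 1: raw Fibonacci values, num of them.
--     fibs = []
--     x, y = 0, 1
--     for _ in range(num if num > 0 else 0):
--         fibs.append(x)
--         x, y = y, x + y
--     # Pass 2: first two values verbatim, then each value with its extras.
--     out = fibs[:2]
--     for v in fibs[2:]:
--         out.append(v)
--         if v % 2 == 0:
--             out.append(v * 2)
--         if v % 3 == 0:
--             out.append(v // 3)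
--         if v % 5 == 0:
--             out.append(v - 5)
--     return out
-- ===== Notes on version B (the rewrite author's own statement) =====
-- stated objective: simpler
-- what changed: B separates concerns into two passes: it first builds the raw Fibonacci list (which makes the num<=0/1/2 special-case returns disappear), then a second pass emits the first two values verbatim and each later value followed by its divisibility extras, instead of A's single loop interleaving Fibonacci state updates with extra-appending behind three early returns.
import Mathlib
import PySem

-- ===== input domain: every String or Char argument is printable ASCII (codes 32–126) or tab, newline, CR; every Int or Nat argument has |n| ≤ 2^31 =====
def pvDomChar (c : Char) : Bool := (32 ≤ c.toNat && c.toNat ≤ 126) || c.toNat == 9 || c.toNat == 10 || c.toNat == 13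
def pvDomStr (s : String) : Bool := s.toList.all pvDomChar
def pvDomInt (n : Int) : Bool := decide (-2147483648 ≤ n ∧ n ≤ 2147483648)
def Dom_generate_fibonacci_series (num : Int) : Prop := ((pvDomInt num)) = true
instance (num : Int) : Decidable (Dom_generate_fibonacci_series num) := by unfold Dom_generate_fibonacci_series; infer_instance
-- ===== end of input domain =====

-- B rebuilds the result in two passes (raw Fibonacci list first, then one shaped pass
-- appending each value with its divisibility extras); objective: simpler (no special-case returns).

-- ===== PORT A =====
def generate_fibonacci_series (num : Int) : List Int :=
  if num ≤ 0 then []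
  else if num = 1 then [0]
  else if num = 2 then [0, 1]
  else
    ((PySem.List.pyRange 2 num 1).foldl
      (fun st _ =>
        let next := st.1 + st.2.1
        let a := st.2.1
        let b := next
        let acc := st.2.2 ++ [next]
        let acc := if PySem.Int.mod next 2 == 0 then acc ++ [next * 2] else acc
        let acc := if PySem.Int.mod next 3 == 0 then acc ++ [PySem.Int.floordiv next 3] else acc
        let acc := if PySem.Int.mod next 5 == 0 then acc ++ [next - 5] else acc
        (a, b, acc))
      (0, 1, [0, 1])).2.2

-- ===== PORT B =====
-- helper: the raw Fibonacci list of a given length (pass 1 of Source B)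
def pvFibList : Nat → Int → Int → List Int
  | 0, _, _ => []
  | n+1, x, y => x :: pvFibList n y (x + y)

def generate_fibonacci_series_alt (num : Int) : List Int :=
  let fibs := pvFibList (if num > 0 then num else 0).toNat 0 1
  (PySem.List.slice fibs (some 2) none).foldl
    (fun out v =>
      let out := out ++ [v]
      let out := if PySem.Int.mod v 2 == 0 then out ++ [v * 2] else out
      let out := if PySem.Int.mod v 3 == 0 then out ++ [PySem.Int.floordiv v 3] else out
      let out := if PySem.Int.mod v 5 == 0 then out ++ [v - 5] else out
      out)
    (PySem.List.slice fibs none (some 2))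

-- ===== PRECONDITION & SPEC =====
def Spec_generate_fibonacci_series (num : Int) (out : List Int) : Prop := out = generate_fibonacci_series_alt num
instance (num : Int) (out : List Int) : Decidable (Spec_generate_fibonacci_series num out) := by unfold Spec_generate_fibonacci_series; infer_instance

-- ===== CLAIM (what is proved, stated in full; the proofs are below) =====
def Claim_equal_generate_fibonacci_series : Prop := ∀ (num : Int), Dom_generate_fibonacci_series num → Spec_generate_fibonacci_series num (generate_fibonacci_series num)

-- ===== LEMMAS AND PROOFS =====

-- the extras a single Fibonacci value v contributes to the output
def pvExtras (v : Int) : List Int :=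
  [v] ++ (if PySem.Int.mod v 2 == 0 then [v * 2] else [])
      ++ (if PySem.Int.mod v 3 == 0 then [PySem.Int.floordiv v 3] else [])
      ++ (if PySem.Int.mod v 5 == 0 then [v - 5] else [])

lemma pvIteAppend (out : List Int) (c : Bool) (x : Int) :
    (if c then out ++ [x] else out) = out ++ (if c then [x] else []) := by
  cases c <;> simp

-- A's loop, from an arbitrary state, appends the flattened extras of the next-number stream
lemma pvFoldA (l : List Int) : ∀ (a b : Int) (acc : List Int),
    (l.foldl
      (fun st _ =>
        let next := st.1 + st.2.1
        let a := st.2.1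
        let b := next
        let acc := st.2.2 ++ [next]
        let acc := if PySem.Int.mod next 2 == 0 then acc ++ [next * 2] else acc
        let acc := if PySem.Int.mod next 3 == 0 then acc ++ [PySem.Int.floordiv next 3] else acc
        let acc := if PySem.Int.mod next 5 == 0 then acc ++ [next - 5] else acc
        (a, b, acc))
      (a, b, acc)).2.2
      = acc ++ (pvFibList l.length (a + b) (a + 2 * b)).flatMap pvExtras := by
  induction l with
  | nil => intro a b acc; simp [pvFibList]
  | cons i t ih =>
    intro a b acc
    simp only [List.foldl_cons, List.length_cons, pvFibList, List.flatMap_cons]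
    rw [ih]
    have : b + 2 * (a + b) = (a + b) + ((a + b) + (a + 2 * b) - (a + b)) := by ring
    simp only [pvIteAppend, pvExtras]
    have harg : b + (a + b) = a + 2 * b := by ring
    have harg2 : b + 2 * (a + b) = (a + b) + (a + 2 * b) := by ring
    rw [harg, harg2]
    simp [List.append_assoc]

-- B's loop appends the flattened extras of the list it traverses
lemma pvFoldB (l : List Int) : ∀ (init : List Int),
    (l.foldl
      (fun out v =>
        let out := out ++ [v]
        let out := if PySem.Int.mod v 2 == 0 then out ++ [v * 2] else out
        let out := if PySem.Int.mod v 3 == 0 then out ++ [PySem.Int.floordiv v 3] else out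
        let out := if PySem.Int.mod v 5 == 0 then out ++ [v - 5] else out
        out)
      init)
      = init ++ l.flatMap pvExtras := by
  induction l with
  | nil => intro init; simp
  | cons v t ih =>
    intro init
    simp only [List.foldl_cons, List.flatMap_cons]
    rw [ih]
    simp only [pvIteAppend, pvExtras]
    simp [List.append_assoc]

lemma pvSliceFrom2 (l : List Int) :
    PySem.List.slice ((0:Int) :: 1 :: l) (some 2) none = l := by
  rw [PySem.List.slice_from] <;> simp

lemma pvSliceTo2 (l : List Int) :
    PySem.List.slice ((0:Int) :: 1 :: l) none (some 2) = [0, 1] := by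
  rw [PySem.List.slice_to] <;> simp

-- ===== VERDICT (by name: the statement is the Claim_ definition above) =====
theorem generate_fibonacci_series_spec : Claim_equal_generate_fibonacci_series := by
  intro num _
  show generate_fibonacci_series num = generate_fibonacci_series_alt num
  unfold generate_fibonacci_series generate_fibonacci_series_alt
  by_cases h0 : num ≤ 0
  · simp [h0, show ¬ num > 0 by omega, pvFibList, PySem.List.slice]
  · by_cases h1 : num = 1
    · subst h1; simp [pvFibList]; decide
    · by_cases h2 : num = 2
      · subst h2; simp [pvFibList]; decide
      · -- num ≥ 3
        have h3 : 3 ≤ num := by omega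
        have hgt : num > 0 := by omega
        obtain ⟨n, hn⟩ : ∃ n : Nat, num.toNat = n + 2 := ⟨num.toNat - 2, by omega⟩
        simp only [h0, h1, h2, if_pos hgt, ite_false]
        rw [pvFoldA, PySem.List.length_pyRange_one]
        rw [hn]
        simp only [pvFibList]
        rw [pvSliceFrom2, pvSliceTo2]
        have hlen : (num - 2).toNat = n := by omega
        rw [pvFoldB]
        norm_num [hlen]
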